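-- pv_equiv track=rewrite | github.com/exestiel/InventoryExport | scripts/add_upca.py | _rest_fieldnames
-- ===== SOURCE A (Python) =====
-- _DEPT_OUTPUT_COLS = frozenset(
--     {"dept", "dept_id", "Dept", "Dept_Id", "DeptName", "deptname"}
-- )
--
-- def _rest_fieldnames(fieldnames: list[str], skip: set[str]) -> list[str]:
--     rest = [h for h in fieldnames if h not in skip and h not in _DEPT_OUTPUT_COLS]
--     if "Description" in rest:
--         i = rest.index("Description") + 1
--         rest[i:i] = ["Dept_Id", "DeptName"]
--     else:
--         rest = ["Dept_Id", "DeptName"] + rest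
--     return rest
-- ===== SOURCE B (Python) =====
-- _DEPT_OUTPUT_COLS = frozenset(
--     {"dept", "dept_id", "Dept", "Dept_Id", "DeptName", "deptname"}
-- )
--
-- def _rest_fieldnames(fieldnames: list[str], skip: set[str]) -> list[str]:
--     result = []
--     inserted = False
--     for h in fieldnames:
--         if h in skip or h in _DEPT_OUTPUT_COLS:
--             continue
--         result.append(h)
--         if not inserted and h == "Description":
--             result += ["Dept_Id", "DeptName"]
--             inserted = True
--     if not inserted:
--         return ["Dept_Id", "DeptName"] + result
--     return result
-- ===== Notes on version B (the rewrite author's own statement) =====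
-- stated objective: alternative
-- what changed: Replaces filter-comprehension + membership test + list.index + slice-splice (three passes over the filtered list) with one fused loop that filters and inserts the Dept columns inline after the first surviving 'Description', prepending them after the loop if none survived.
import Mathlib
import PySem

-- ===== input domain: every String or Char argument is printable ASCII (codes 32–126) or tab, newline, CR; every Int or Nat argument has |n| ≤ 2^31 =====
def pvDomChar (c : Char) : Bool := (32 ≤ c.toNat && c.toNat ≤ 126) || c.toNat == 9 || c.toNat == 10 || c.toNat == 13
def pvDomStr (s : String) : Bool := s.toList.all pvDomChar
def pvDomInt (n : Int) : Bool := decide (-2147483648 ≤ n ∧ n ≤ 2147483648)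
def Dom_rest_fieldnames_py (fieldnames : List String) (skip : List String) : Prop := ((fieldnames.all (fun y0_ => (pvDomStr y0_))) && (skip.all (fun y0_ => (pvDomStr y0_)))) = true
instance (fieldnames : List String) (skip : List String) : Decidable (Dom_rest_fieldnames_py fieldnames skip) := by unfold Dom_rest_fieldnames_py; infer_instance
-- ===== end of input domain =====

-- B fuses A's filter comprehension, membership test, index and slice-splice into one loop
-- that inserts the Dept columns inline (objective: alternative decomposition; same cost).

-- ===== PORT A =====
-- the frozenset _DEPT_OUTPUT_COLS (membership-tested only)
def deptOutputCols : List String := ["dept", "dept_id", "Dept", "Dept_Id", "DeptName", "deptname"]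

def rest_fieldnames_py (fieldnames : List String) (skip : List String) : List String :=
  -- rest = [h for h in fieldnames if h not in skip and h not in _DEPT_OUTPUT_COLS]
  let rest := fieldnames.filter (fun h => !(skip.contains h) && !(deptOutputCols.contains h))
  if rest.contains "Description" then
    -- i = rest.index("Description") + 1; rest[i:i] = ["Dept_Id","DeptName"]
    -- (slice assignment at 0 ≤ i ≤ len is exactly take i ++ new ++ drop i)
    match PySem.List.index? rest "Description" with
    | some k =>
        let i := k + 1
        rest.take i ++ ["Dept_Id", "DeptName"] ++ rest.drop i
    | none => rest  -- unreachable: guarded by the membership test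
  else
    ["Dept_Id", "DeptName"] ++ rest

-- ===== PORT B =====
-- one loop step of Source B: state is (result, inserted)
def altStep (skip : List String) (st : List String × Bool) (h : String) : List String × Bool :=
  if skip.contains h || deptOutputCols.contains h then st
  else
    let result := st.1 ++ [h]
    if !st.2 && h == "Description" then (result ++ ["Dept_Id", "DeptName"], true)
    else (result, st.2)

def rest_fieldnames_py_alt (fieldnames : List String) (skip : List String) : List String :=
  let st := fieldnames.foldl (altStep skip) ([], false)
  if !st.2 then ["Dept_Id", "DeptName"] ++ st.1 else st.1

-- ===== PRECONDITION & SPEC =====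
def Spec_rest_fieldnames_py (fieldnames : List String) (skip : List String) (out : List String) : Prop := out = rest_fieldnames_py_alt fieldnames skip
instance (fieldnames : List String) (skip : List String) (out : List String) : Decidable (Spec_rest_fieldnames_py fieldnames skip out) := by unfold Spec_rest_fieldnames_py; infer_instance

-- ===== CLAIM (what is proved, stated in full; the proofs are below) =====
def Claim_equal_rest_fieldnames_py : Prop := ∀ (fieldnames : List String) (skip : List String), Dom_rest_fieldnames_py fieldnames skip → Spec_rest_fieldnames_py fieldnames skip (rest_fieldnames_py fieldnames skip)

-- ===== LEMMAS AND PROOFS =====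

-- insert ["Dept_Id","DeptName"] right after the first "Description" (proof-side common form)
def spliceAfter : List String → List String
  | [] => []
  | h :: t => if h = "Description" then h :: "Dept_Id" :: "DeptName" :: t else h :: spliceAfter t

-- A's take/drop splice at index?+1 is spliceAfter, whenever "Description" is present
theorem splice_eq_spliceAfter (l : List String) (hmem : "Description" ∈ l) :
    (match PySem.List.index? l "Description" with
     | some k => l.take (k + 1) ++ ["Dept_Id", "DeptName"] ++ l.drop (k + 1)
     | none => l) = spliceAfter l := by
  induction l with
  | nil => cases hmem
  | cons h t ih =>
    by_cases hh : h = "Description"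
    · subst hh
      rw [PySem.List.index?_cons_self]
      simp [spliceAfter]
    · have hmem' : "Description" ∈ t := by
        cases hmem with
        | head => exact absurd rfl hh
        | tail _ h' => exact h'
      rw [PySem.List.index?_cons_of_ne t hh]
      have hnn : PySem.List.index? t "Description" ≠ none := by
        intro e
        rw [PySem.List.index?_eq_none_iff] at e
        exact e hmem'
      obtain ⟨k, hk⟩ := Option.ne_none_iff_exists'.mp hnn
      have ht := ih hmem'
      rw [hk] at ht ⊢
      simp only [Option.map_some, spliceAfter, if_neg hh]
      simp only [List.take_succ_cons, List.drop_succ_cons] at ht ⊢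
      simp [← ht]

-- once inserted, the loop just appends the surviving headers
theorem foldl_true (skip : List String) (xs : List String) (acc : List String) :
    xs.foldl (altStep skip) (acc, true) =
      (acc ++ xs.filter (fun h => !(skip.contains h) && !(deptOutputCols.contains h)), true) := by
  induction xs generalizing acc with
  | nil => simp
  | cons h t ih =>
    simp only [List.foldl_cons, altStep]
    by_cases hk : (skip.contains h || deptOutputCols.contains h) = true
    · have hf : (!(skip.contains h) && !(deptOutputCols.contains h)) = false := by
        cases hs : skip.contains h <;> cases hd : deptOutputCols.contains h <;> simp_all
      rw [if_pos hk, List.filter_cons, hf, ih]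
      simp
    · have hf : (!(skip.contains h) && !(deptOutputCols.contains h)) = true := by
        cases hs : skip.contains h <;> cases hd : deptOutputCols.contains h <;> simp_all
      rw [if_neg hk, List.filter_cons, hf]
      simp only [Bool.not_true, Bool.false_and, if_neg Bool.false_ne_true, ih]
      simp

-- before insertion: the loop filters and splices after the first surviving "Description"
theorem foldl_false (skip : List String) (xs : List String) (acc : List String) :
    xs.foldl (altStep skip) (acc, false) =
      (if (xs.filter (fun h => !(skip.contains h) && !(deptOutputCols.contains h))).contains "Description" then
        (acc ++ spliceAfter (xs.filter (fun h => !(skip.contains h) && !(deptOutputCols.contains h))), true)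
      else (acc ++ xs.filter (fun h => !(skip.contains h) && !(deptOutputCols.contains h)), false)) := by
  induction xs generalizing acc with
  | nil => simp
  | cons h t ih =>
    simp only [List.foldl_cons, altStep]
    by_cases hk : (skip.contains h || deptOutputCols.contains h) = true
    · have hf : (!(skip.contains h) && !(deptOutputCols.contains h)) = false := by
        cases hs : skip.contains h <;> cases hd : deptOutputCols.contains h <;> simp_all
      rw [if_pos hk, ih]
      have hfil : List.filter (fun h => !(skip.contains h) && !(deptOutputCols.contains h)) (h :: t)
          = List.filter (fun h => !(skip.contains h) && !(deptOutputCols.contains h)) t := by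
        rw [List.filter_cons, hf]; simp
      rw [hfil]
    · have hf : (!(skip.contains h) && !(deptOutputCols.contains h)) = true := by
        cases hs : skip.contains h <;> cases hd : deptOutputCols.contains h <;> simp_all
      rw [if_neg hk]
      by_cases hh : h = "Description"
      · subst hh
        have hcond : (!false && ("Description" == "Description")) = true := by simp
        rw [if_pos hcond, foldl_true]
        have hfil : List.filter (fun h => !(skip.contains h) && !(deptOutputCols.contains h)) ("Description" :: t)
            = "Description" :: List.filter (fun h => !(skip.contains h) && !(deptOutputCols.contains h)) t := by
          rw [List.filter_cons, hf]; simp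
        rw [hfil]
        have hmm : (("Description" :: List.filter (fun h => !(skip.contains h) && !(deptOutputCols.contains h)) t).contains "Description") = true := by simp
        rw [hmm, if_pos rfl]
        simp [spliceAfter]
      · have hne : (h == "Description") = false := by simpa using hh
        rw [if_neg (by simp [hne] : ¬ ((!false && (h == "Description")) = true)), ih]
        have hh' : ¬ ("Description" = h) := fun e => hh e.symm
        have hfil : List.filter (fun h => !(skip.contains h) && !(deptOutputCols.contains h)) (h :: t)
            = h :: List.filter (fun h => !(skip.contains h) && !(deptOutputCols.contains h)) t := by
          rw [List.filter_cons, hf]; simp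
        rw [hfil]
        by_cases hd : ((List.filter (fun h => !(skip.contains h) && !(deptOutputCols.contains h)) t).contains "Description") = true
        · have hmm : ((h :: List.filter (fun h => !(skip.contains h) && !(deptOutputCols.contains h)) t).contains "Description") = true := by
            simp at hd ⊢; exact Or.inr hd
          rw [hd, hmm, if_pos rfl, if_pos rfl]
          simp [spliceAfter, hh]
        · have hd' : ((List.filter (fun h => !(skip.contains h) && !(deptOutputCols.contains h)) t).contains "Description") = false := by
            simpa using hd
          have hmm : ((h :: List.filter (fun h => !(skip.contains h) && !(deptOutputCols.contains h)) t).contains "Description") = false := by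
            simp at hd' ⊢; exact ⟨hh', hd'⟩
          rw [hd', hmm]
          simp

-- ===== VERDICT (by name: the statement is the Claim_ definition above) =====
theorem rest_fieldnames_py_spec : Claim_equal_rest_fieldnames_py := by
  intro fieldnames skip _
  unfold Spec_rest_fieldnames_py rest_fieldnames_py rest_fieldnames_py_alt
  rw [foldl_false]
  set f := fieldnames.filter (fun h => !(skip.contains h) && !(deptOutputCols.contains h)) with hf
  by_cases hc : f.contains "Description" = true
  · have hmem : "Description" ∈ f := by simpa using hc
    simp only [hc]
    rw [splice_eq_spliceAfter f hmem]
    simp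
  · have hnc : f.contains "Description" = false := by simpa using hc
    rw [hnc]
    simp
    exact fun hm => absurd hm (by simpa using hc)
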